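-- pv_equiv track=rewrite | github.com/jd-develop/advent-of-code | 2024/03/puzzle.py | parse
-- ===== SOURCE A (Python) =====
-- def parse(puzzle_input: str) -> tuple[list[tuple[int, int]], list[tuple[int, int]]]:
--     """Parse the input into tuples of ints to multiply"""
--     result1: list[tuple[int, int]] = []
--     result2: list[tuple[int, int]] = []
--
--     current = ""
--     do_the_next_one = True
--
--     # that’s what happen when you’re too lazy to think to better solutions
--     for char in puzzle_input:
--         if char == "m":
--             current = "m"
--         elif char == "u" and current == "m":
--             current += "u"
--         elif char == "l" and current == "mu":
--             current += "l"
--         elif char == "(" and current == "mul":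
--             current += "("
--         elif char in "1234567890" and current.startswith("mul("):
--             current += char
--         elif char == "," and current.startswith("mul(") and "," not in current:
--             current += char
--         elif char == ")" and current.startswith("mul(") and "," in current:
--             current = current[4:].split(",")
--             try:
--                 if do_the_next_one:
--                     result2.append((
--                         int(current[0]), int(current[1])
--                     ))
--                 result1.append((
--                     int(current[0]), int(current[1])
--                 ))
--             except Exception:
--                 pass
--             current = ""
--         elif char == "d":
--             current = "d"
--         elif char == "o" and current == "d":
--             current += "o"
--         elif char == "n" and current == "do":
--             current += "n"
--         elif char == "'" and current == "don":
--             current += "'"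
--         elif char == "t" and current == "don'":
--             current += "t"
--         elif char == "(" and current in ["do", "don't"]:
--             current += "("
--         elif char == ")" and current in ["do(", "don't("]:
--             do_the_next_one = current == "do("
--             current = ""
--         else:
--             current = ""
--
--     return result1, result2
-- ===== SOURCE B (Python) =====
-- def parse(puzzle_input: str) -> tuple[list[tuple[int, int]], list[tuple[int, int]]]:
--     """Parse the input into tuples of ints to multiply.
--
--     Token scanner: at each position try to match a complete instruction
--     (mul(d+,d+), do(), don't()) by direct lookahead and jump past it,
--     instead of A's char-by-char buffer state machine."""
--     result1: list[tuple[int, int]] = []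
--     result2: list[tuple[int, int]] = []
--     enabled = True
--     i, n = 0, len(puzzle_input)
--     while i < n:
--         m = _match_mul(puzzle_input, i)
--         if m is not None:
--             a, b, i = m
--             result1.append((a, b))
--             if enabled:
--                 result2.append((a, b))
--         elif puzzle_input.startswith("do()", i):
--             enabled = True
--             i += 4
--         elif puzzle_input.startswith("don't()", i):
--             enabled = False
--             i += 7
--         else:
--             i += 1
--     return result1, result2
--
--
-- def _match_mul(s: str, i: int):
--     """Match mul(<digits>,<digits>) at position i; return (a, b, end) or None."""
--     if not s.startswith("mul(", i):
--         return None
--     j = i + 4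
--     k = j
--     while k < len(s) and s[k] in "0123456789":
--         k += 1
--     if k == j or k >= len(s) or s[k] != ",":
--         return None
--     p = k + 1
--     q = p
--     while q < len(s) and s[q] in "0123456789":
--         q += 1
--     if q == p or q >= len(s) or s[q] != ")":
--         return None
--     return int(s[j:k]), int(s[p:q]), q + 1
-- ===== Notes on version B (the rewrite author's own statement) =====
-- stated objective: alternative
-- what changed: Replaced the character-by-character buffer state machine with a position-jumping token scanner that matches a whole mul(d+,d+)/do()/don't() instruction by direct lookahead at each position and skips past it.
import Mathlib
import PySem

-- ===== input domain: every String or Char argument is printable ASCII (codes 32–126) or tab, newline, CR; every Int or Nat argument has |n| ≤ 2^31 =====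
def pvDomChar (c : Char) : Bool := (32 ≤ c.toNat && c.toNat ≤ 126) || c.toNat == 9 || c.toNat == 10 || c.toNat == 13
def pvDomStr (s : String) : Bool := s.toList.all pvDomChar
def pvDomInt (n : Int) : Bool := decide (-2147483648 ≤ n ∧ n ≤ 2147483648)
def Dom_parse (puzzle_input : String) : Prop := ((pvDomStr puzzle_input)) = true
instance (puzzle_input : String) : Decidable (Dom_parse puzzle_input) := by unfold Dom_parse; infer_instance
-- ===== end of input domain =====

-- B replaces A's char-by-char buffer state machine by a token scanner that matches a whole
-- instruction by lookahead at each position (objective: alternative; same O(n) cost).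

-- ===== PORT A =====
-- `char in "1234567890"` (A) / `s[k] in "0123456789"` (B): the same membership test.
def isDig (c : Char) : Bool := "1234567890".toList.contains c

-- int() applied to a digit-only string (both programs only call int() on such strings):
-- it raises ValueError exactly on "" and otherwise returns the decimal value.  Exact on that domain.
def digitsToInt (ds : List Char) : Int := ds.foldl (fun a c => a * 10 + ((c.toNat : Int) - 48)) 0

-- one iteration of A's `for char in puzzle_input` loop; cur is the `current` buffer (str as List Char)
def stepA (st : (List (Int × Int)) × (List (Int × Int)) × Bool × List Char) (c : Char) :
    (List (Int × Int)) × (List (Int × Int)) × Bool × List Char :=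
  match st with
  | (r1, r2, flag, cur) =>
    if c = 'm' then (r1, r2, flag, ['m'])
    else if c = 'u' ∧ cur = ['m'] then (r1, r2, flag, cur ++ ['u'])
    else if c = 'l' ∧ cur = ['m', 'u'] then (r1, r2, flag, cur ++ ['l'])
    else if c = '(' ∧ cur = ['m', 'u', 'l'] then (r1, r2, flag, cur ++ ['('])
    else if isDig c ∧ ['m', 'u', 'l', '('].isPrefixOf cur then (r1, r2, flag, cur ++ [c])
    else if c = ',' ∧ ['m', 'u', 'l', '('].isPrefixOf cur ∧ ¬ (',' ∈ cur) then (r1, r2, flag, cur ++ [c])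
    else if c = ')' ∧ ['m', 'u', 'l', '('].isPrefixOf cur ∧ ',' ∈ cur then
      -- current = current[4:].split(","); try int(current[0]), int(current[1]) (except: append nothing)
      let parts := PySem.Chars.splitOn (cur.drop 4) [',']
      let p0 := parts.getD 0 []
      let p1 := parts.getD 1 []
      if p0 = [] ∨ p1 = [] then (r1, r2, flag, [])
      else (r1 ++ [(digitsToInt p0, digitsToInt p1)],
            if flag then r2 ++ [(digitsToInt p0, digitsToInt p1)] else r2, flag, [])
    else if c = 'd' then (r1, r2, flag, ['d'])
    else if c = 'o' ∧ cur = ['d'] then (r1, r2, flag, cur ++ ['o'])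
    else if c = 'n' ∧ cur = ['d', 'o'] then (r1, r2, flag, cur ++ ['n'])
    else if c = '\'' ∧ cur = ['d', 'o', 'n'] then (r1, r2, flag, cur ++ ['\''])
    else if c = 't' ∧ cur = ['d', 'o', 'n', '\''] then (r1, r2, flag, cur ++ ['t'])
    else if c = '(' ∧ (cur = ['d', 'o'] ∨ cur = ['d', 'o', 'n', '\'', 't']) then (r1, r2, flag, cur ++ ['('])
    else if c = ')' ∧ (cur = ['d', 'o', '('] ∨ cur = ['d', 'o', 'n', '\'', 't', '(']) then
      (r1, r2, decide (cur = ['d', 'o', '(']), [])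
    else (r1, r2, flag, [])

def parse (puzzle_input : String) : (List (Int × Int)) × (List (Int × Int)) :=
  let fin := puzzle_input.toList.foldl stepA ([], [], true, [])
  (fin.1, fin.2.1)

-- ===== PORT B =====
-- _match_mul: try to match mul(<digits>,<digits>) at the current position (= head of l)
def matchMul (l : List Char) : Option (Int × Int × List Char) :=
  match l with
  | 'm' :: 'u' :: 'l' :: '(' :: r =>
    match r.takeWhile isDig, r.dropWhile isDig with
    | [], _ => none
    | d :: ds, ',' :: r2 =>
      match r2.takeWhile isDig, r2.dropWhile isDig with
      | [], _ => none
      | e :: es, ')' :: r4 => some (digitsToInt (d :: ds), digitsToInt (e :: es), r4)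
      | _, _ => none
    | _, _ => none
  | _ => none

lemma matchMul_rest_lt {l : List Char} {a b : Int} {rest : List Char}
    (h : matchMul l = some (a, b, rest)) : rest.length < l.length := by
  unfold matchMul at h
  split at h
  · next m r =>
    split at h
    · exact absurd h (by simp)
    · next d ds r2 heq1 heq2 =>
      split at h
      · exact absurd h (by simp)
      · next e es r4 heq3 heq4 =>
        simp only [Option.some.injEq, Prod.mk.injEq] at h
        obtain ⟨-, -, rfl⟩ := h
        have h2 : r2.length < r.length := by
          have := List.length_dropWhile_le (p := isDig) (l := r)
          rw [heq2] at this; simpa using Nat.lt_of_succ_le this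
        have h4 : r4.length < r2.length := by
          have := List.length_dropWhile_le (p := isDig) (l := r2)
          rw [heq4] at this; simpa using Nat.lt_of_succ_le this
        simp only [List.length_cons]
        omega
      · exact absurd h (by simp)
    · exact absurd h (by simp)
  · exact absurd h (by simp)

-- the `while i < n` loop of B, on the suffix starting at position i
def scanB (l : List Char) (en : Bool) (r1 r2 : List (Int × Int)) :
    (List (Int × Int)) × (List (Int × Int)) :=
  match l with
  | [] => (r1, r2)
  | c :: t =>
    match h : matchMul (c :: t) with
    | some (a, b, rest) =>
      scanB rest en (r1 ++ [(a, b)]) (if en then r2 ++ [(a, b)] else r2)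
    | none =>
      if (c :: t).take 4 = ['d', 'o', '(', ')'] then scanB ((c :: t).drop 4) true r1 r2
      else if (c :: t).take 7 = ['d', 'o', 'n', '\'', 't', '(', ')'] then scanB ((c :: t).drop 7) false r1 r2
      else scanB t en r1 r2
  termination_by l.length
  decreasing_by
  · exact matchMul_rest_lt h
  · simp
  · simp
  · simp

def parse_alt (puzzle_input : String) : (List (Int × Int)) × (List (Int × Int)) :=
  scanB puzzle_input.toList true [] []

-- ===== PRECONDITION & SPEC =====
def Spec_parse (puzzle_input : String) (out : (List (Int × Int)) × (List (Int × Int))) : Prop := out = parse_alt puzzle_input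
instance (puzzle_input : String) (out : (List (Int × Int)) × (List (Int × Int))) : Decidable (Spec_parse puzzle_input out) := by unfold Spec_parse; infer_instance

-- ===== CLAIM (what is proved, stated in full; the proofs are below) =====
def Claim_equal_parse : Prop := ∀ (puzzle_input : String), Dom_parse puzzle_input → Spec_parse puzzle_input (parse puzzle_input)

-- ===== LEMMAS AND PROOFS =====

-- A's run, projected to the pair of result lists (proof-side helper)
def runA (st : (List (Int × Int)) × (List (Int × Int)) × Bool × List Char) (l : List Char) :
    (List (Int × Int)) × (List (Int × Int)) :=
  ((List.foldl stepA st l).1, (List.foldl stepA st l).2.1)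

lemma isDig_ne (c x : Char) (hd : isDig c = true) (hx : isDig x = false) : c ≠ x := by
  rintro rfl; rw [hd] at hx; cases hx

lemma no_comma {D : List Char} (hD : ∀ c ∈ D, isDig c = true) : ',' ∉ D := by
  intro hm; exact absurd (hD _ hm) (by decide)

-- "none of stepA's branches fires" (mirrors the if-chain of stepA)
def CElse (cur : List Char) (c : Char) : Prop :=
  c ≠ 'm' ∧ ¬(c = 'u' ∧ cur = ['m']) ∧ ¬(c = 'l' ∧ cur = ['m','u']) ∧ ¬(c = '(' ∧ cur = ['m','u','l']) ∧
  ¬(isDig c = true ∧ ['m','u','l','('].isPrefixOf cur = true) ∧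
  ¬(c = ',' ∧ ['m','u','l','('].isPrefixOf cur = true ∧ ¬ (',' ∈ cur)) ∧
  ¬(c = ')' ∧ ['m','u','l','('].isPrefixOf cur = true ∧ ',' ∈ cur) ∧
  c ≠ 'd' ∧ ¬(c = 'o' ∧ cur = ['d']) ∧ ¬(c = 'n' ∧ cur = ['d','o']) ∧
  ¬(c = '\'' ∧ cur = ['d','o','n']) ∧ ¬(c = 't' ∧ cur = ['d','o','n','\'']) ∧
  ¬(c = '(' ∧ (cur = ['d','o'] ∨ cur = ['d','o','n','\'','t'])) ∧
  ¬(c = ')' ∧ (cur = ['d','o','('] ∨ cur = ['d','o','n','\'','t','(']))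

lemma step_else (r1 r2 : List (Int × Int)) (f : Bool) {cur : List Char} {c : Char}
    (h : CElse cur c) : stepA (r1, r2, f, cur) c = (r1, r2, f, []) := by
  obtain ⟨h1,h2,h3,h4,h5,h6,h7,h8,h9,h10,h11,h12,h13,h14⟩ := h
  unfold stepA
  dsimp only
  rw [if_neg h1, if_neg h2, if_neg h3, if_neg h4, if_neg (by simpa using h5),
      if_neg (by simpa using h6), if_neg (by simpa using h7), if_neg h8, if_neg h9,
      if_neg h10, if_neg h11, if_neg h12, if_neg h13, if_neg h14]

lemma step_m (r1 r2 : List (Int × Int)) (f : Bool) (cur : List Char) :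
    stepA (r1, r2, f, cur) 'm' = (r1, r2, f, ['m']) := by
  unfold stepA; dsimp only; rw [if_pos rfl]

lemma step_d (r1 r2 : List (Int × Int)) (f : Bool) (cur : List Char) :
    stepA (r1, r2, f, cur) 'd' = (r1, r2, f, ['d']) := by
  unfold stepA
  dsimp only
  rw [if_neg (by simp), if_neg (by simp), if_neg (by simp), if_neg (by simp),
      if_neg (by simp [isDig]), if_neg (by simp), if_neg (by simp), if_pos rfl]

lemma step_digit (r1 r2 : List (Int × Int)) (f : Bool) (D : List Char) {c : Char}
    (hc : isDig c = true) :
    stepA (r1, r2, f, 'm'::'u'::'l'::'('::D) c = (r1, r2, f, 'm'::'u'::'l'::'('::(D ++ [c])) := by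
  have h1 : c ≠ 'm' := isDig_ne c 'm' hc (by decide)
  unfold stepA
  dsimp only
  rw [if_neg h1, if_neg (by simp), if_neg (by simp), if_neg (by simp),
      if_pos ⟨hc, by simp [List.isPrefixOf]⟩]
  simp

lemma step_comma (r1 r2 : List (Int × Int)) (f : Bool) {D : List Char}
    (hD : ∀ c ∈ D, isDig c = true) :
    stepA (r1, r2, f, 'm'::'u'::'l'::'('::D) ',' = (r1, r2, f, 'm'::'u'::'l'::'('::(D ++ [','])) := by
  have hmD : ',' ∉ D := no_comma hD
  unfold stepA
  dsimp only
  rw [if_neg (by decide), if_neg (by simp), if_neg (by simp), if_neg (by simp),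
      if_neg (by simp [isDig]), if_pos ⟨rfl, by simp [List.isPrefixOf], by simp [hmD]⟩]
  simp

-- splitOn on a single comma
lemma go_no_comma : ∀ (fuel : Nat) (l cur : List Char) (acc : List (List Char)),
    ',' ∉ l → l.length < fuel →
    PySem.Chars.splitOn.go [','] fuel l cur acc = ((cur.reverse ++ l) :: acc).reverse := by
  intro fuel
  induction fuel with
  | zero => intro l cur acc _ h; omega
  | succ n ih =>
    intro l cur acc hmem hlen
    cases l with
    | nil => simp [PySem.Chars.splitOn.go]
    | cons c t =>
      have hc : c ≠ ',' := fun h => hmem (by simp [h])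
      rw [PySem.Chars.splitOn.go]
      rw [if_neg (by simp [List.isPrefixOf]; exact fun h => absurd h.symm hc)]
      rw [ih t (c::cur) acc (fun h => hmem (by simp [h])) (by simpa using Nat.lt_of_succ_lt_succ hlen)]
      simp

lemma go_comma : ∀ (D : List Char) (fuel : Nat) (E cur : List Char) (acc : List (List Char)),
    ',' ∉ D → ',' ∉ E → D.length + E.length + 1 < fuel →
    PySem.Chars.splitOn.go [','] fuel (D ++ ','::E) cur acc = acc.reverse ++ [cur.reverse ++ D, E] := by
  intro D
  induction D with
  | nil =>
    intro fuel E cur acc _ hE hlen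
    cases fuel with
    | zero => omega
    | succ n =>
      rw [List.nil_append, PySem.Chars.splitOn.go]
      rw [if_pos (by simp [List.isPrefixOf])]
      rw [show [','].length = 1 from rfl]
      rw [show List.drop 1 (','::E) = E from rfl]
      rw [go_no_comma n E [] (cur.reverse :: acc) hE (by simpa using hlen)]
      simp
  | cons c D' ih =>
    intro fuel E cur acc hD hE hlen
    have hc : c ≠ ',' := fun h => hD (by simp [h])
    cases fuel with
    | zero => omega
    | succ n =>
      rw [List.cons_append, PySem.Chars.splitOn.go]
      rw [if_neg (by simp [List.isPrefixOf]; exact fun h => absurd h.symm hc)]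
      rw [ih n E (c::cur) acc (fun h => hD (by simp [h])) hE (by simp at hlen ⊢; omega)]
      simp

lemma splitOn_comma {D E : List Char} (hD : ',' ∉ D) (hE : ',' ∉ E) :
    PySem.Chars.splitOn (D ++ ','::E) [','] = [D, E] := by
  unfold PySem.Chars.splitOn
  rw [go_comma D ((D ++ ','::E).length + 1) E [] [] hD hE (by simp)]
  simp

lemma takeWhile_digits_stop {D X : List Char} {x : Char}
    (hD : ∀ c ∈ D, isDig c = true) (hx : isDig x = false) :
    (D ++ x::X).takeWhile isDig = D ∧ (D ++ x::X).dropWhile isDig = x::X := by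
  constructor
  · rw [List.takeWhile_append_of_pos hD, List.takeWhile_cons_of_neg (by simp [hx]), List.append_nil]
  · rw [List.dropWhile_append_of_pos hD, List.dropWhile_cons_of_neg (by simp [hx])]

lemma step_close (r1 r2 : List (Int × Int)) (f : Bool) {D E : List Char}
    (hD : ∀ c ∈ D, isDig c = true) (hE : ∀ c ∈ E, isDig c = true) :
    stepA (r1, r2, f, 'm'::'u'::'l'::'('::(D ++ ','::E)) ')' =
      (if D = [] ∨ E = [] then (r1, r2, f, [])
       else (r1 ++ [(digitsToInt D, digitsToInt E)],
             if f then r2 ++ [(digitsToInt D, digitsToInt E)] else r2, f, [])) := by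
  have hmD : ',' ∉ D := no_comma hD
  have hmE : ',' ∉ E := no_comma hE
  unfold stepA
  dsimp only
  rw [if_neg (by decide), if_neg (by simp), if_neg (by simp), if_neg (by simp),
      if_neg (by simp [isDig]), if_neg (by simp),
      if_pos ⟨rfl, by simp [List.isPrefixOf], by simp⟩]
  simp only [List.drop_succ_cons, List.drop_zero, splitOn_comma hmD hmE,
    List.getD_cons_zero, List.getD_cons_succ]

-- running A over a block of digit characters, buffer in a mul( state, appends them to the buffer
lemma foldl_digits : ∀ (ds D Y : List Char) (r1 r2 : List (Int × Int)) (f : Bool),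
    (∀ c ∈ ds, isDig c = true) →
    List.foldl stepA (r1, r2, f, 'm'::'u'::'l'::'('::D) (ds ++ Y) =
      List.foldl stepA (r1, r2, f, 'm'::'u'::'l'::'('::(D ++ ds)) Y := by
  intro ds
  induction ds with
  | nil => intro D Y r1 r2 f _; simp
  | cons c cs ih =>
    intro D Y r1 r2 f hds
    rw [List.cons_append, List.foldl_cons, step_digit _ _ _ _ (hds c (by simp)),
        ih (D ++ [c]) Y r1 r2 f (fun x hx => hds x (by simp [hx]))]
    simp

-- matchMul inversion
lemma matchMul_eq_some {l : List Char} {a b : Int} {rest : List Char}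
    (h : matchMul l = some (a, b, rest)) :
    ∃ ds1 ds2 : List Char, (∀ c ∈ ds1, isDig c = true) ∧ (∀ c ∈ ds2, isDig c = true) ∧
      ds1 ≠ [] ∧ ds2 ≠ [] ∧ l = 'm'::'u'::'l'::'('::(ds1 ++ ','::ds2 ++ ')'::rest) ∧
      a = digitsToInt ds1 ∧ b = digitsToInt ds2 := by
  unfold matchMul at h
  split at h
  · next m r =>
    split at h
    · exact absurd h (by simp)
    · next d ds r2 heq1 heq2 =>
      split at h
      · exact absurd h (by simp)
      · next e es r4 heq3 heq4 =>
        simp only [Option.some.injEq, Prod.mk.injEq] at h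
        obtain ⟨ha, hb, hrest⟩ := h
        refine ⟨d::ds, e::es, ?_, ?_, by simp, by simp, ?_, ha.symm, hb.symm⟩
        · intro x hx; rw [← heq1] at hx; exact List.mem_takeWhile_imp hx
        · intro x hx; rw [← heq3] at hx; exact List.mem_takeWhile_imp hx
        · have hr : r = (d::ds) ++ ','::r2 := by
            conv_lhs => rw [← List.takeWhile_append_dropWhile (p := isDig) (l := r)]
            rw [heq1, heq2]
          have hr2 : r2 = (e::es) ++ ')'::r4 := by
            conv_lhs => rw [← List.takeWhile_append_dropWhile (p := isDig) (l := r2)]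
            rw [heq3, heq4]
          subst hrest
          rw [hr, hr2]
          simp
      · exact absurd h (by simp)
    · exact absurd h (by simp)
  · exact absurd h (by simp)

lemma mm_none_split {D E t : List Char} (hD : ∀ c ∈ D, isDig c = true) (hE : ∀ c ∈ E, isDig c = true)
    (h : matchMul ('m'::'u'::'l'::'('::(D ++ ','::E ++ ')'::t)) = none) : D = [] ∨ E = [] := by
  by_contra hh
  rw [not_or] at hh
  obtain ⟨hD0, hE0⟩ := hh
  obtain ⟨d, D', rfl⟩ := List.exists_cons_of_ne_nil hD0
  obtain ⟨e, E', rfl⟩ := List.exists_cons_of_ne_nil hE0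
  have t1 := takeWhile_digits_stop (x := ',') (X := (e::E') ++ ')'::t) hD (by decide)
  have t2 := takeWhile_digits_stop (x := ')') (X := t) hE (by decide)
  unfold matchMul at h
  rw [show (d::D') ++ ','::((e::E') ++ ')'::t) = (d::D') ++ ','::(e::E') ++ ')'::t by simp] at t1
  simp only [t1.1, t1.2, t2.1, t2.2] at h
  simp at h

lemma runA_cons (st : (List (Int × Int)) × (List (Int × Int)) × Bool × List Char) (c : Char)
    (t : List Char) : runA st (c::t) = runA (stepA st c) t := rfl

lemma CElse_nil {c : Char} (hm : c ≠ 'm') (hd : c ≠ 'd') : CElse [] c := by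
  simp [CElse, List.isPrefixOf, hm, hd]

lemma step_nil (r1 r2 : List (Int × Int)) (f : Bool) {c : Char} (hm : c ≠ 'm') (hd : c ≠ 'd') :
    stepA (r1, r2, f, []) c = (r1, r2, f, []) :=
  step_else r1 r2 f (CElse_nil hm hd)

-- the chain of "state collapses to the empty buffer" lemmas
lemma Lcomma : ∀ (l D E : List Char) (r1 r2 : List (Int × Int)) (f : Bool),
    (∀ c ∈ D, isDig c = true) → (∀ c ∈ E, isDig c = true) →
    matchMul ('m'::'u'::'l'::'('::(D ++ ','::(E ++ l))) = none →
    runA (r1, r2, f, 'm'::'u'::'l'::'('::(D ++ ','::E)) l = runA (r1, r2, f, []) l := by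
  intro l
  induction l with
  | nil => intro D E r1 r2 f _ _ _; rfl
  | cons c t ih =>
    intro D E r1 r2 f hD hE H
    by_cases hdig : isDig c = true
    · rw [runA_cons, runA_cons, step_digit _ _ _ _ hdig,
          step_nil _ _ _ (isDig_ne c 'm' hdig (by decide)) (isDig_ne c 'd' hdig (by decide)),
          show (D ++ ','::E) ++ [c] = D ++ ','::(E ++ [c]) by simp]
      refine ih D (E ++ [c]) r1 r2 f hD ?_ (by simpa [List.append_assoc] using H)
      intro x hx
      rcases List.mem_append.mp hx with h | h
      · exact hE x h
      · simp at h; subst h; exact hdig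
    · by_cases hco : c = ','
      · subst hco
        rw [runA_cons, runA_cons,
            step_else r1 r2 f (show CElse ('m'::'u'::'l'::'('::(D ++ ','::E)) ',' by
              simp [CElse, List.isPrefixOf, isDig]),
            show stepA (r1, r2, f, []) ',' = (r1, r2, f, []) from rfl]
      · by_cases hcl : c = ')'
        · subst hcl
          have hDE : D = [] ∨ E = [] := mm_none_split hD hE (by simpa using H)
          rw [runA_cons, runA_cons, step_close _ _ _ hD hE, if_pos hDE,
              show stepA (r1, r2, f, []) ')' = (r1, r2, f, []) from rfl]
        · by_cases hm : c = 'm'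
          · subst hm; rw [runA_cons, runA_cons, step_m, step_m]
          · by_cases hd : c = 'd'
            · subst hd; rw [runA_cons, runA_cons, step_d, step_d]
            · rw [runA_cons, runA_cons,
                  step_else r1 r2 f (show CElse ('m'::'u'::'l'::'('::(D ++ ','::E)) c by
                    simp [CElse, List.isPrefixOf, hm, hd, hdig, hco, hcl]),
                  step_nil _ _ _ hm hd]

lemma Lopen : ∀ (l D : List Char) (r1 r2 : List (Int × Int)) (f : Bool),
    (∀ c ∈ D, isDig c = true) →
    matchMul ('m'::'u'::'l'::'('::(D ++ l)) = none →
    runA (r1, r2, f, 'm'::'u'::'l'::'('::D) l = runA (r1, r2, f, []) l := by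
  intro l
  induction l with
  | nil => intro D r1 r2 f _ _; rfl
  | cons c t ih =>
    intro D r1 r2 f hD H
    by_cases hdig : isDig c = true
    · rw [runA_cons, runA_cons, step_digit _ _ _ _ hdig,
          step_nil _ _ _ (isDig_ne c 'm' hdig (by decide)) (isDig_ne c 'd' hdig (by decide))]
      refine ih (D ++ [c]) r1 r2 f ?_ (by simpa [List.append_assoc] using H)
      intro x hx
      rcases List.mem_append.mp hx with h | h
      · exact hD x h
      · simp at h; subst h; exact hdig
    · by_cases hco : c = ','
      · subst hco
        rw [runA_cons, runA_cons, step_comma _ _ _ hD,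
            show stepA (r1, r2, f, []) ',' = (r1, r2, f, []) from rfl]
        exact Lcomma t D [] r1 r2 f hD (by simp) (by simpa using H)
      · by_cases hcl : c = ')'
        · subst hcl
          have hmD : ',' ∉ D := no_comma hD
          rw [runA_cons, runA_cons,
              step_else r1 r2 f (show CElse ('m'::'u'::'l'::'('::D) ')' by
                simp [CElse, List.isPrefixOf, isDig, hmD]),
              show stepA (r1, r2, f, []) ')' = (r1, r2, f, []) from rfl]
        · by_cases hm : c = 'm'
          · subst hm; rw [runA_cons, runA_cons, step_m, step_m]
          · by_cases hd : c = 'd'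
            · subst hd; rw [runA_cons, runA_cons, step_d, step_d]
            · rw [runA_cons, runA_cons,
                  step_else r1 r2 f (show CElse ('m'::'u'::'l'::'('::D) c by
                    simp [CElse, List.isPrefixOf, hm, hd, hdig, hco, hcl]),
                  step_nil _ _ _ hm hd]

lemma Lmul : ∀ (l : List Char) (r1 r2 : List (Int × Int)) (f : Bool),
    matchMul ('m'::'u'::'l'::l) = none →
    runA (r1, r2, f, ['m','u','l']) l = runA (r1, r2, f, []) l := by
  intro l r1 r2 f H
  cases l with
  | nil => rfl
  | cons c t =>
    by_cases hp : c = '('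
    · subst hp
      rw [runA_cons, runA_cons,
          show stepA (r1, r2, f, ['m','u','l']) '(' = (r1, r2, f, ['m','u','l','(']) from rfl,
          show stepA (r1, r2, f, []) '(' = (r1, r2, f, []) from rfl]
      exact Lopen t [] r1 r2 f (by simp) (by simpa using H)
    · by_cases hm : c = 'm'
      · subst hm; rw [runA_cons, runA_cons, step_m, step_m]
      · by_cases hd : c = 'd'
        · subst hd; rw [runA_cons, runA_cons, step_d, step_d]
        · rw [runA_cons, runA_cons,
              step_else r1 r2 f (show CElse ['m','u','l'] c by
                simp [CElse, List.isPrefixOf, hm, hd, hp]),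
              step_nil _ _ _ hm hd]

lemma Lmu : ∀ (l : List Char) (r1 r2 : List (Int × Int)) (f : Bool),
    matchMul ('m'::'u'::l) = none →
    runA (r1, r2, f, ['m','u']) l = runA (r1, r2, f, []) l := by
  intro l r1 r2 f H
  cases l with
  | nil => rfl
  | cons c t =>
    by_cases hp : c = 'l'
    · subst hp
      rw [runA_cons, runA_cons,
          show stepA (r1, r2, f, ['m','u']) 'l' = (r1, r2, f, ['m','u','l']) from rfl,
          show stepA (r1, r2, f, []) 'l' = (r1, r2, f, []) from rfl]
      exact Lmul t r1 r2 f H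
    · by_cases hm : c = 'm'
      · subst hm; rw [runA_cons, runA_cons, step_m, step_m]
      · by_cases hd : c = 'd'
        · subst hd; rw [runA_cons, runA_cons, step_d, step_d]
        · rw [runA_cons, runA_cons,
              step_else r1 r2 f (show CElse ['m','u'] c by
                simp [CElse, List.isPrefixOf, hm, hd, hp]),
              step_nil _ _ _ hm hd]

lemma Lm : ∀ (l : List Char) (r1 r2 : List (Int × Int)) (f : Bool),
    matchMul ('m'::l) = none →
    runA (r1, r2, f, ['m']) l = runA (r1, r2, f, []) l := by
  intro l r1 r2 f H
  cases l with
  | nil => rfl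
  | cons c t =>
    by_cases hp : c = 'u'
    · subst hp
      rw [runA_cons, runA_cons,
          show stepA (r1, r2, f, ['m']) 'u' = (r1, r2, f, ['m','u']) from rfl,
          show stepA (r1, r2, f, []) 'u' = (r1, r2, f, []) from rfl]
      exact Lmu t r1 r2 f H
    · by_cases hm : c = 'm'
      · subst hm; rw [runA_cons, runA_cons, step_m, step_m]
      · by_cases hd : c = 'd'
        · subst hd; rw [runA_cons, runA_cons, step_d, step_d]
        · rw [runA_cons, runA_cons,
              step_else r1 r2 f (show CElse ['m'] c by
                simp [CElse, List.isPrefixOf, hm, hd, hp]),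
              step_nil _ _ _ hm hd]

lemma LdoP : ∀ (l : List Char) (r1 r2 : List (Int × Int)) (f : Bool),
    l.take 1 ≠ [')'] →
    runA (r1, r2, f, ['d','o','(']) l = runA (r1, r2, f, []) l := by
  intro l r1 r2 f hg
  cases l with
  | nil => rfl
  | cons c t =>
    have hc : c ≠ ')' := by rintro rfl; simp at hg
    by_cases hm : c = 'm'
    · subst hm; rw [runA_cons, runA_cons, step_m, step_m]
    · by_cases hd : c = 'd'
      · subst hd; rw [runA_cons, runA_cons, step_d, step_d]
      · rw [runA_cons, runA_cons,
            step_else r1 r2 f (show CElse ['d','o','('] c by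
              simp [CElse, List.isPrefixOf, hm, hd, hc]),
            step_nil _ _ _ hm hd]

lemma LdontP : ∀ (l : List Char) (r1 r2 : List (Int × Int)) (f : Bool),
    l.take 1 ≠ [')'] →
    runA (r1, r2, f, ['d','o','n','\'','t','(']) l = runA (r1, r2, f, []) l := by
  intro l r1 r2 f hg
  cases l with
  | nil => rfl
  | cons c t =>
    have hc : c ≠ ')' := by rintro rfl; simp at hg
    by_cases hm : c = 'm'
    · subst hm; rw [runA_cons, runA_cons, step_m, step_m]
    · by_cases hd : c = 'd'
      · subst hd; rw [runA_cons, runA_cons, step_d, step_d]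
      · rw [runA_cons, runA_cons,
            step_else r1 r2 f (show CElse ['d','o','n','\'','t','('] c by
              simp [CElse, List.isPrefixOf, hm, hd, hc]),
            step_nil _ _ _ hm hd]

lemma Ldont : ∀ (l : List Char) (r1 r2 : List (Int × Int)) (f : Bool),
    l.take 2 ≠ ['(',')'] →
    runA (r1, r2, f, ['d','o','n','\'','t']) l = runA (r1, r2, f, []) l := by
  intro l r1 r2 f hg
  cases l with
  | nil => rfl
  | cons c t =>
    by_cases hp : c = '('
    · subst hp
      rw [runA_cons, runA_cons,
          show stepA (r1, r2, f, ['d','o','n','\'','t']) '(' = (r1, r2, f, ['d','o','n','\'','t','(']) from rfl,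
          show stepA (r1, r2, f, []) '(' = (r1, r2, f, []) from rfl]
      exact LdontP t r1 r2 f (by simpa using hg)
    · by_cases hm : c = 'm'
      · subst hm; rw [runA_cons, runA_cons, step_m, step_m]
      · by_cases hd : c = 'd'
        · subst hd; rw [runA_cons, runA_cons, step_d, step_d]
        · rw [runA_cons, runA_cons,
              step_else r1 r2 f (show CElse ['d','o','n','\'','t'] c by
                simp [CElse, List.isPrefixOf, hm, hd, hp]),
              step_nil _ _ _ hm hd]

lemma Ldonq : ∀ (l : List Char) (r1 r2 : List (Int × Int)) (f : Bool),
    l.take 3 ≠ ['t','(',')'] →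
    runA (r1, r2, f, ['d','o','n','\'']) l = runA (r1, r2, f, []) l := by
  intro l r1 r2 f hg
  cases l with
  | nil => rfl
  | cons c t =>
    by_cases hp : c = 't'
    · subst hp
      rw [runA_cons, runA_cons,
          show stepA (r1, r2, f, ['d','o','n','\'']) 't' = (r1, r2, f, ['d','o','n','\'','t']) from rfl,
          show stepA (r1, r2, f, []) 't' = (r1, r2, f, []) from rfl]
      exact Ldont t r1 r2 f (by simpa using hg)
    · by_cases hm : c = 'm'
      · subst hm; rw [runA_cons, runA_cons, step_m, step_m]
      · by_cases hd : c = 'd'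
        · subst hd; rw [runA_cons, runA_cons, step_d, step_d]
        · rw [runA_cons, runA_cons,
              step_else r1 r2 f (show CElse ['d','o','n','\''] c by
                simp [CElse, List.isPrefixOf, hm, hd, hp]),
              step_nil _ _ _ hm hd]

lemma Ldon : ∀ (l : List Char) (r1 r2 : List (Int × Int)) (f : Bool),
    l.take 4 ≠ ['\'','t','(',')'] →
    runA (r1, r2, f, ['d','o','n']) l = runA (r1, r2, f, []) l := by
  intro l r1 r2 f hg
  cases l with
  | nil => rfl
  | cons c t =>
    by_cases hp : c = '\''
    · subst hp
      rw [runA_cons, runA_cons,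
          show stepA (r1, r2, f, ['d','o','n']) '\'' = (r1, r2, f, ['d','o','n','\'']) from rfl,
          show stepA (r1, r2, f, []) '\'' = (r1, r2, f, []) from rfl]
      exact Ldonq t r1 r2 f (by simpa using hg)
    · by_cases hm : c = 'm'
      · subst hm; rw [runA_cons, runA_cons, step_m, step_m]
      · by_cases hd : c = 'd'
        · subst hd; rw [runA_cons, runA_cons, step_d, step_d]
        · rw [runA_cons, runA_cons,
              step_else r1 r2 f (show CElse ['d','o','n'] c by
                simp [CElse, List.isPrefixOf, hm, hd, hp]),
              step_nil _ _ _ hm hd]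

lemma Ldo : ∀ (l : List Char) (r1 r2 : List (Int × Int)) (f : Bool),
    l.take 2 ≠ ['(',')'] → l.take 5 ≠ ['n','\'','t','(',')'] →
    runA (r1, r2, f, ['d','o']) l = runA (r1, r2, f, []) l := by
  intro l r1 r2 f hg2 hg5
  cases l with
  | nil => rfl
  | cons c t =>
    by_cases hp : c = '('
    · subst hp
      rw [runA_cons, runA_cons,
          show stepA (r1, r2, f, ['d','o']) '(' = (r1, r2, f, ['d','o','(']) from rfl,
          show stepA (r1, r2, f, []) '(' = (r1, r2, f, []) from rfl]
      exact LdoP t r1 r2 f (by simpa using hg2)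
    · by_cases hn : c = 'n'
      · subst hn
        rw [runA_cons, runA_cons,
            show stepA (r1, r2, f, ['d','o']) 'n' = (r1, r2, f, ['d','o','n']) from rfl,
            show stepA (r1, r2, f, []) 'n' = (r1, r2, f, []) from rfl]
        exact Ldon t r1 r2 f (by simpa using hg5)
      · by_cases hm : c = 'm'
        · subst hm; rw [runA_cons, runA_cons, step_m, step_m]
        · by_cases hd : c = 'd'
          · subst hd; rw [runA_cons, runA_cons, step_d, step_d]
          · rw [runA_cons, runA_cons,
                step_else r1 r2 f (show CElse ['d','o'] c by
                  simp [CElse, List.isPrefixOf, hm, hd, hp, hn]),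
                step_nil _ _ _ hm hd]

lemma Ld : ∀ (l : List Char) (r1 r2 : List (Int × Int)) (f : Bool),
    l.take 3 ≠ ['o','(',')'] → l.take 6 ≠ ['o','n','\'','t','(',')'] →
    runA (r1, r2, f, ['d']) l = runA (r1, r2, f, []) l := by
  intro l r1 r2 f hg3 hg6
  cases l with
  | nil => rfl
  | cons c t =>
    by_cases ho : c = 'o'
    · subst ho
      rw [runA_cons, runA_cons,
          show stepA (r1, r2, f, ['d']) 'o' = (r1, r2, f, ['d','o']) from rfl,
          show stepA (r1, r2, f, []) 'o' = (r1, r2, f, []) from rfl]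
      exact Ldo t r1 r2 f (by simpa using hg3) (by simpa using hg6)
    · by_cases hm : c = 'm'
      · subst hm; rw [runA_cons, runA_cons, step_m, step_m]
      · by_cases hd : c = 'd'
        · subst hd; rw [runA_cons, runA_cons, step_d, step_d]
        · rw [runA_cons, runA_cons,
              step_else r1 r2 f (show CElse ['d'] c by
                simp [CElse, List.isPrefixOf, hm, hd, ho]),
              step_nil _ _ _ hm hd]

-- scanB unfolding lemmas
lemma scanB_nil (en : Bool) (r1 r2 : List (Int × Int)) : scanB [] en r1 r2 = (r1, r2) := by
  simp [scanB]

lemma scanB_some {l : List Char} {a b : Int} {rest : List Char} (en : Bool) (r1 r2 : List (Int × Int))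
    (hl : l ≠ []) (h : matchMul l = some (a, b, rest)) :
    scanB l en r1 r2 = scanB rest en (r1 ++ [(a, b)]) (if en then r2 ++ [(a, b)] else r2) := by
  cases l with
  | nil => exact absurd rfl hl
  | cons c t =>
    rw [scanB]
    split
    · next a' b' rest' h' =>
      rw [h] at h'
      simp only [Option.some.injEq, Prod.mk.injEq] at h'
      obtain ⟨rfl, rfl, rfl⟩ := h'
      rfl
    · next h' => rw [h] at h'; simp at h'

lemma scanB_do {l : List Char} (en : Bool) (r1 r2 : List (Int × Int))
    (hmm : matchMul l = none) (h4 : l.take 4 = ['d','o','(',')']) :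
    scanB l en r1 r2 = scanB (l.drop 4) true r1 r2 := by
  cases l with
  | nil => simp at h4
  | cons c t =>
    rw [scanB]
    split
    · next a' b' rest' h' => rw [hmm] at h'; simp at h'
    · next h' => rw [if_pos h4]

lemma scanB_dont {l : List Char} (en : Bool) (r1 r2 : List (Int × Int))
    (hmm : matchMul l = none) (h4 : l.take 4 ≠ ['d','o','(',')'])
    (h7 : l.take 7 = ['d','o','n','\'','t','(',')']) :
    scanB l en r1 r2 = scanB (l.drop 7) false r1 r2 := by
  cases l with
  | nil => simp at h7
  | cons c t =>
    rw [scanB]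
    split
    · next a' b' rest' h' => rw [hmm] at h'; simp at h'
    · next h' => rw [if_neg h4, if_pos h7]

lemma scanB_skip {c : Char} {t : List Char} (en : Bool) (r1 r2 : List (Int × Int))
    (hmm : matchMul (c::t) = none) (h4 : (c::t).take 4 ≠ ['d','o','(',')'])
    (h7 : (c::t).take 7 ≠ ['d','o','n','\'','t','(',')']) :
    scanB (c::t) en r1 r2 = scanB t en r1 r2 := by
  rw [scanB]
  split
  · next a' b' rest' h' => rw [hmm] at h'; simp at h'
  · next h' => rw [if_neg h4, if_neg h7]

-- the main simulation
lemma mainSim : ∀ (n : Nat) (l : List Char), l.length ≤ n → ∀ (f : Bool) (r1 r2 : List (Int × Int)),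
    runA (r1, r2, f, []) l = scanB l f r1 r2 := by
  intro n
  induction n with
  | zero =>
    intro l hl f r1 r2
    have : l = [] := by cases l with | nil => rfl | cons c t => simp at hl
    subst this
    rw [scanB_nil]
    rfl
  | succ n ih =>
    intro l hl f r1 r2
    cases l with
    | nil => rw [scanB_nil]; rfl
    | cons c t =>
      rcases hmm : matchMul (c::t) with _ | ⟨a, b, rest⟩
      · -- no mul( instruction at this position
        by_cases h4 : (c::t).take 4 = ['d','o','(',')']
        · rw [scanB_do f r1 r2 hmm h4]
          have hsh : c::t = ['d','o','(',')'] ++ (c::t).drop 4 := by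
            conv_lhs => rw [← List.take_append_drop 4 (c::t)]
            rw [h4]
          conv_lhs => rw [hsh]
          show runA (r1, r2, true, []) ((c::t).drop 4) = _
          exact ih ((c::t).drop 4) (by simp at hl ⊢; omega) true r1 r2
        · by_cases h7 : (c::t).take 7 = ['d','o','n','\'','t','(',')']
          · rw [scanB_dont f r1 r2 hmm h4 h7]
            have hsh : c::t = ['d','o','n','\'','t','(',')'] ++ (c::t).drop 7 := by
              conv_lhs => rw [← List.take_append_drop 7 (c::t)]
              rw [h7]
            conv_lhs => rw [hsh]
            show runA (r1, r2, false, []) ((c::t).drop 7) = _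
            exact ih ((c::t).drop 7) (by simp at hl ⊢; omega) false r1 r2
          · rw [scanB_skip f r1 r2 hmm h4 h7]
            have hlt : t.length ≤ n := by simp at hl; omega
            by_cases hm : c = 'm'
            · subst hm
              rw [runA_cons, step_m, Lm t r1 r2 f hmm]
              exact ih t hlt f r1 r2
            · by_cases hd : c = 'd'
              · subst hd
                rw [runA_cons, step_d,
                    Ld t r1 r2 f (fun h => h4 (by simp [List.take_succ_cons, h]))
                      (fun h => h7 (by simp [List.take_succ_cons, h]))]
                exact ih t hlt f r1 r2
              · rw [runA_cons, step_nil _ _ _ hm hd]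
                exact ih t hlt f r1 r2
      · -- a mul(a,b) instruction matches here
        obtain ⟨ds1, ds2, h1, h2, hne1, hne2, hshape, ha, hb⟩ := matchMul_eq_some hmm
        subst ha; subst hb
        rw [scanB_some f r1 r2 (by simp) hmm, hshape]
        show runA (r1, r2, f, ['m','u','l','(']) (ds1 ++ ','::ds2 ++ ')'::rest) = _
        unfold runA
        simp only [List.append_assoc, List.cons_append]
        rw [show ('m'::'u'::'l'::'('::[] : List Char) = ['m','u','l','('] from rfl] at *
        rw [show (['m','u','l','('] : List Char) = 'm'::'u'::'l'::'('::[] from rfl,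
            foldl_digits ds1 [] _ r1 r2 f h1, List.nil_append,
            List.foldl_cons, step_comma r1 r2 f h1,
            foldl_digits ds2 (ds1 ++ [',']) _ r1 r2 f h2,
            show (ds1 ++ [',']) ++ ds2 = ds1 ++ ','::ds2 by simp,
            List.foldl_cons, step_close r1 r2 f h1 h2, if_neg (by simp [hne1, hne2])]
        have hlen : rest.length ≤ n := by
          have := congrArg List.length hshape
          simp at this hl
          omega
        exact ih rest hlen f (r1 ++ [(digitsToInt ds1, digitsToInt ds2)])
          (if f then r2 ++ [(digitsToInt ds1, digitsToInt ds2)] else r2)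

-- ===== VERDICT (by name: the statement is the Claim_ definition above) =====
theorem parse_spec : Claim_equal_parse := by
  intro s _
  unfold Spec_parse parse parse_alt
  exact mainSim s.toList.length s.toList le_rfl true [] []
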